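-- pv_equiv track=rewrite | github.com/EastDesire/boremapper | boremapper/utils.py | has_same_values_in_columns
-- ===== SOURCE A (Python) =====
-- def has_same_values_in_columns(data: list) -> bool:
--     """
--     Takes two-dimensional data in format [row][column] and returns True if each column contains identical values in it,
--     and each row has the same number of columns.
--     """
--     rows_count = len(data)
--
--     if rows_count == 0:
--         return True
--
--     if [len(row) for row in data].count(len(data[0])) != rows_count:
--         return False # Rows don't have the same number of columns
--
--     for i, value in enumerate(data[0]):
--         if [row[i] for row in data].count(value) != rows_count:
--             return False # Column doesn't contain identical values
--
--     return True
-- ===== SOURCE B (Python) =====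
-- def has_same_values_in_columns(data: list) -> bool:
--     """Columns are uniform and rows equal-length iff every row equals the first row."""
--     if not data:
--         return True
--     first = data[0]
--     if any(len(row) != len(first) for row in data):
--         return False
--     return all(row == first for row in data)
-- ===== Notes on version B (the rewrite author's own statement) =====
-- stated objective: simpler
-- what changed: Replaces the per-column count-based scan over enumerate(data[0]) with a single whole-row comparison: after the length guard, columns are all uniform iff every row equals the first row, so B just tests row == data[0] for each row.
import Mathlib
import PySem

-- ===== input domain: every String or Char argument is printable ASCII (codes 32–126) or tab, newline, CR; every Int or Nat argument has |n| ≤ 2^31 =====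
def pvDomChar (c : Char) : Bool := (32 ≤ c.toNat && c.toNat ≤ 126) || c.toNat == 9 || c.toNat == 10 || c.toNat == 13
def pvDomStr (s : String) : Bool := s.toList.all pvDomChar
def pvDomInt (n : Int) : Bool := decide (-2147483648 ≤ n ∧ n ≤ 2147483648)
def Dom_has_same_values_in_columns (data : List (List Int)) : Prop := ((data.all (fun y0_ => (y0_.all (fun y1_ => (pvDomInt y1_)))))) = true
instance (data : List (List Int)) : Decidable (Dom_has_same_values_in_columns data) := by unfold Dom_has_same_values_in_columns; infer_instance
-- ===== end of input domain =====

-- B changes the algorithm: instead of counting each column's values, it compares every row to the first row (simpler).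

-- ===== PORT A =====
-- the 'for i, value in enumerate(data[0])' loop with its early 'return False';
-- row[i] is ported as pyGetD row i 0, exact here because the loop only runs after the
-- equal-length guard passed, so every index i < len(data[0]) = len(row) is in range.
def hsvcLoop (data : List (List Int)) (rows_count : Nat) : List (Int × Int) → Bool
  | [] => true
  | (i, value) :: rest =>
      if PySem.List.count (data.map (fun row => PySem.List.pyGetD row i 0)) value ≠ rows_count then false
      else hsvcLoop data rows_count rest

def has_same_values_in_columns (data : List (List Int)) : Bool :=
  let rows_count := data.length
  if rows_count = 0 then true
  else
    match data with
    | [] => true  -- unreachable (rows_count ≠ 0)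
    | d0 :: _ =>
      if PySem.List.count (data.map (fun row => row.length)) d0.length ≠ rows_count then false
      else hsvcLoop data rows_count (PySem.List.enumerate d0)

-- ===== PORT B =====
def has_same_values_in_columns_alt (data : List (List Int)) : Bool :=
  match data with
  | [] => true
  | first :: _ =>
    if data.any (fun row => row.length ≠ first.length) then false
    else data.all (fun row => row == first)

-- ===== PRECONDITION & SPEC =====
def Spec_has_same_values_in_columns (data : List (List Int)) (out : Bool) : Prop := out = has_same_values_in_columns_alt data
instance (data : List (List Int)) (out : Bool) : Decidable (Spec_has_same_values_in_columns data out) := by unfold Spec_has_same_values_in_columns; infer_instance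

-- ===== CLAIM (what is proved, stated in full; the proofs are below) =====
def Claim_equal_has_same_values_in_columns : Prop := ∀ (data : List (List Int)), Dom_has_same_values_in_columns data → Spec_has_same_values_in_columns data (has_same_values_in_columns data)

-- ===== LEMMAS AND PROOFS =====

theorem hsvcLoop_all (data : List (List Int)) (rc : Nat) (L : List (Int × Int)) :
    hsvcLoop data rc L =
      L.all (fun iv => PySem.List.count (data.map (fun row => PySem.List.pyGetD row iv.1 0)) iv.2 == rc) := by
  induction L with
  | nil => rfl
  | cons hd tl ih =>
      obtain ⟨i, v⟩ := hd
      simp only [hsvcLoop, List.all_cons, ih]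
      by_cases h : PySem.List.count (data.map (fun row => PySem.List.pyGetD row i 0)) v = rc
      · rw [if_neg (by simpa using h), show (PySem.List.count (data.map (fun row => PySem.List.pyGetD row i 0)) v == rc) = true by simpa using h, Bool.true_and]
      · rw [if_pos h, show (PySem.List.count (data.map (fun row => PySem.List.pyGetD row i 0)) v == rc) = false by simpa using h, Bool.false_and]

theorem enumerate_all_iff (xs : List Int) (s : Int) (p : Int → Int → Bool) :
    (PySem.List.enumerate xs s).all (fun iv => p iv.1 iv.2) = true ↔
      ∀ k : Nat, (hk : k < xs.length) → p (s + k) xs[k] = true := by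
  induction xs generalizing s with
  | nil => simp [PySem.List.enumerate_nil]
  | cons x xs ih =>
      rw [PySem.List.enumerate_cons]
      simp only [List.all_cons, Bool.and_eq_true, ih]
      constructor
      · rintro ⟨h0, h⟩ k hk
        cases k with
        | zero => simpa using h0
        | succ n =>
            have := h n (by simpa using Nat.lt_of_succ_lt_succ hk)
            simpa [add_assoc, add_comm, add_left_comm] using this
      · intro h
        refine ⟨by simpa using h 0 (by simp), fun k hk => ?_⟩
        have := h (k + 1) (by simpa using Nat.succ_lt_succ hk)
        simpa [add_assoc, add_comm, add_left_comm] using this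

theorem count_eq_len_iff {α : Type} [BEq α] [LawfulBEq α] (data : List (List Int)) (f : List Int → α) (v : α) :
    (PySem.List.count (data.map f) v = data.length) ↔ ∀ row ∈ data, f row = v := by
  rw [PySem.List.count_eq]
  rw [show data.length = (data.map f).length by simp]
  rw [List.count_eq_length]
  constructor
  · intro h row hr
    exact ((by simpa using h (f row) (List.mem_map_of_mem hr)) : v = f row).symm
  · intro h b hb
    obtain ⟨row, hr, rfl⟩ := List.mem_map.1 hb
    simp [h row hr]

-- ===== VERDICT (by name: the statement is the Claim_ definition above) =====
theorem has_same_values_in_columns_spec : Claim_equal_has_same_values_in_columns := by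
  intro data _
  unfold Spec_has_same_values_in_columns
  unfold has_same_values_in_columns has_same_values_in_columns_alt
  cases data with
  | nil => rfl
  | cons d0 rest =>
      simp only [List.length_cons, Nat.succ_ne_zero, if_false]
      by_cases hL : ∀ row ∈ (d0 :: rest), row.length = d0.length
      · -- lengths guard passes in both programs
        have hcnt : PySem.List.count ((d0 :: rest).map (fun row => row.length)) d0.length
            = rest.length + 1 := by
          simpa using (count_eq_len_iff (d0 :: rest) (fun row => row.length) d0.length).2 hL
        have hBg : ((d0 :: rest).any fun row => decide (row.length ≠ d0.length)) = false := by
          rw [List.any_eq_false]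
          intro row hr
          simp [hL row hr]
        rw [if_neg (fun h => h hcnt), hBg]
        simp only [Bool.false_eq_true, if_false]
        rw [hsvcLoop_all]
        cases hB : ((d0 :: rest)).all (fun row => row == d0) with
        | true =>
            rw [List.all_eq_true] at hB
            apply (enumerate_all_iff d0 0 (fun i v =>
              PySem.List.count ((d0 :: rest).map (fun row => PySem.List.pyGetD row i 0)) v
                == rest.length + 1)).2
            intro k hk
            simp only [zero_add, beq_iff_eq]
            apply (count_eq_len_iff (d0 :: rest)
              (fun row => PySem.List.pyGetD row (k : Int) 0) d0[k]).2
            intro row hrow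
            have hrd : row = d0 := by simpa using hB row hrow
            subst hrd
            rw [PySem.List.pyGetD_natCast, List.getD_eq_getElem?_getD,
                List.getElem?_eq_getElem hk]
            rfl
        | false =>
            rw [List.all_eq_false] at hB
            obtain ⟨row, hrow, hne⟩ := hB
            have hne' : row ≠ d0 := by simpa using hne
            have hrl : row.length = d0.length := hL row hrow
            have hex : ∃ k : Nat, ∃ hk : k < d0.length, row[k]'(by omega) ≠ d0[k] := by
              by_contra hall
              push_neg at hall
              exact hne' (List.ext_getElem hrl (fun k h1 h2 => hall k (by omega)))
            obtain ⟨k, hk, hkne⟩ := hex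
            apply Bool.eq_false_iff.2
            intro habs
            have hc := (enumerate_all_iff d0 0 (fun i v =>
              PySem.List.count ((d0 :: rest).map (fun row => PySem.List.pyGetD row i 0)) v
                == rest.length + 1)).1 habs k hk
            simp only [zero_add, beq_iff_eq] at hc
            have hcnt2 := (count_eq_len_iff (d0 :: rest)
              (fun row => PySem.List.pyGetD row (k : Int) 0) d0[k]).1 (by simpa using hc) row hrow
            rw [PySem.List.pyGetD_natCast, List.getD_eq_getElem?_getD,
                List.getElem?_eq_getElem (by omega)] at hcnt2
            exact hkne (by simpa using hcnt2)
      · -- a row with a different length: both return false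
        have hA : PySem.List.count ((d0 :: rest).map (fun row => row.length)) d0.length
            ≠ rest.length + 1 := by
          intro h
          exact hL ((count_eq_len_iff (d0 :: rest) (fun row => row.length) d0.length).1
            (by simpa using h))
        push_neg at hL
        obtain ⟨row, hr, hne⟩ := hL
        have hBg : ((d0 :: rest).any fun row => decide (row.length ≠ d0.length)) = true := by
          rw [List.any_eq_true]
          exact ⟨row, hr, by simpa using hne⟩
        rw [if_pos hA, if_pos hBg]
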